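-- pv_equiv track=rewrite | github.com/frestr/Python-obfuscator-3000 | obfuscator.py | replace_name
-- ===== SOURCE A (Python) =====
-- def replace_name(line, old, new):
--     new_line = ''
--     prev_index = 0
--     for i in range(len(line)):
--         try:
--             if (line[i:i+len(old)] == old and
--                     (i == 0 or not line[i-1].isalnum()) and
--                     (i + len(old) >= len(line) or not line[i+len(old)].isalnum())):
--                 new_line += line[prev_index:i] + new
--                 prev_index = i + len(old)
--         except IndexError:
--             break
--     new_line += line[prev_index:]
--     return new_line
-- ===== SOURCE B (Python) =====
-- def replace_name(line, old, new):
--     if not old: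
--         # empty pattern: whole-word matching is vacuous; return the line unchanged
--         return line
--     n, m = len(line), len(old)
--     parts = []
--     prev = 0
--     start = 0
--     while True:
--         pos = line.find(old, start)
--         if pos == -1:
--             break
--         if ((pos == 0 or not line[pos - 1].isalnum()) and
--                 (pos + m >= n or not line[pos + m].isalnum())):
--             parts.append(line[prev:pos])
--             parts.append(new)
--             prev = pos + m
--         start = pos + 1
--     parts.append(line[prev:])
--     return ''.join(parts)
-- ===== Notes on version B (the rewrite author's own statement) =====
-- stated objective: faster
-- what changed: A compares a fresh slice line[i:i+len(old)] against old at every index and rebuilds the string by repeated concatenation; B jumps from occurrence to occurrence with str.find, checks the alnum word boundaries only there, and joins the collected segments once.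
-- outside the precondition, e.g. on replace_name('-', '', 'X'): A returns 'X-', B returns '-'
import Mathlib
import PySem

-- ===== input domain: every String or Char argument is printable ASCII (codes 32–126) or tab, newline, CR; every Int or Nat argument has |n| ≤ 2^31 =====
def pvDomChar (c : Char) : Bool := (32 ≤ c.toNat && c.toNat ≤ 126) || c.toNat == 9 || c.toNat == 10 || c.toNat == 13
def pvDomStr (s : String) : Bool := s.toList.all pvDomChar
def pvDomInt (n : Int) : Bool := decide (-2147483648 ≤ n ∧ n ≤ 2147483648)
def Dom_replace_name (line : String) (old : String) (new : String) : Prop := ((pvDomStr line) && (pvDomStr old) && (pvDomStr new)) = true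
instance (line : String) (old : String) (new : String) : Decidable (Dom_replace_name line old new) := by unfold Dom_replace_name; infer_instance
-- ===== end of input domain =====

-- B replaces A's per-index slice comparison by a find-driven scan that jumps from occurrence
-- to occurrence and joins the collected segments once (objective: faster, constant factor).
-- ===== PORT A =====
-- A, on the character list: one fold over range(len(line)) carrying (new_line, prev_index);
-- the try/except IndexError in A is dead code (slicing and the guarded index never raise).
def replace_name_chars (line : List Char) (old : List Char) (nw : List Char) : List Char :=
  let st := (PySem.List.pyRange 0 (line.length : Int) 1).foldl
    (fun (st : List Char × Int) i =>
      if PySem.List.slice line (some i) (some (i + (old.length : Int))) = old ∧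
         (i = 0 ∨ ¬(PySem.Chars.isalnum (PySem.List.pyGetD line (i - 1) ' ') = true)) ∧
         ((line.length : Int) ≤ i + (old.length : Int) ∨
           ¬(PySem.Chars.isalnum (PySem.List.pyGetD line (i + (old.length : Int)) ' ') = true))
      then (st.1 ++ PySem.List.slice line (some st.2) (some i) ++ nw, i + (old.length : Int))
      else st)
    (([], 0) : List Char × Int)
  st.1 ++ PySem.List.slice line (some st.2) none

def replace_name (line : String) (old : String) (new : String) : String :=
  String.ofList (replace_name_chars line.toList old.toList new.toList)

-- ===== PORT B =====
-- B's while loop: pos = line.find(old, start); on a word-boundary hit emit segment + new.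
-- The disjunct 'line.length < start' in the stopping test is a totality guard only: with
-- old ≠ [] the loop never raises start above line.length (findFrom then returns -1 anyway).
def replace_name_alt_go (line : List Char) (old : List Char) (nw : List Char)
    (parts : List (List Char)) (prev : Nat) (start : Nat) : List (List Char) :=
  let pos := PySem.Chars.findFrom line old (start : Int) none
  if h : pos = -1 ∨ line.length < start then
    parts ++ [PySem.List.slice line (some (prev : Int)) none]
  else
    let p := pos.toNat
    if ((p == 0) || !(PySem.Chars.isalnum (line.getD (p - 1) ' '))) &&
       ((decide (line.length ≤ p + old.length)) || !(PySem.Chars.isalnum (line.getD (p + old.length) ' ')))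
    then replace_name_alt_go line old nw
           (parts ++ [PySem.List.slice line (some (prev : Int)) (some (p : Int)), nw])
           (p + old.length) (p + 1)
    else replace_name_alt_go line old nw parts prev (p + 1)
termination_by line.length + 1 - start
decreasing_by
  all_goals
    have hs : start ≤ line.length := by omega
    have hspec := PySem.Chars.findFrom_natCast_spec line old start hs (by tauto)
    omega

def replace_name_alt (line : String) (old : String) (new : String) : String :=
  if old.toList = [] then line
  else String.ofList (PySem.Chars.join []
    (replace_name_alt_go line.toList old.toList new.toList [] 0 0))

-- ===== PRECONDITION & SPEC =====
-- Pre_ excludes only old = "": whole-word replacement of the empty string is unspecified, and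
-- A's value there (inserting new at every position whose neighbours are non-alphanumeric) is an
-- accidental corner; B returns the line unchanged on it.
def Pre_replace_name (line : String) (old : String) (new : String) : Prop := old ≠ ""
instance (line : String) (old : String) (new : String) : Decidable (Pre_replace_name line old new) := by unfold Pre_replace_name; infer_instance
def pvWitness_replace_name : String × String × String := ("foo bar foo", "foo", "baz")

def Spec_replace_name (line : String) (old : String) (new : String) (out : String) : Prop := out = replace_name_alt line old new
instance (line : String) (old : String) (new : String) (out : String) : Decidable (Spec_replace_name line old new out) := by unfold Spec_replace_name; infer_instance

-- ===== CLAIM (what is proved, stated in full; the proofs are below) =====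
def Claim_equal_replace_name : Prop := ∀ (line : String) (old : String) (new : String), Dom_replace_name line old new → Pre_replace_name line old new → Spec_replace_name line old new (replace_name line old new)

-- ===== LEMMAS AND PROOFS =====

-- A's match condition at index i (as a Bool), and A's state update, named for the proofs.
def pvCond (line : List Char) (old : List Char) (i : Int) : Prop :=
  PySem.List.slice line (some i) (some (i + (old.length : Int))) = old ∧
  (i = 0 ∨ ¬(PySem.Chars.isalnum (PySem.List.pyGetD line (i - 1) ' ') = true)) ∧
  ((line.length : Int) ≤ i + (old.length : Int) ∨
    ¬(PySem.Chars.isalnum (PySem.List.pyGetD line (i + (old.length : Int)) ' ') = true))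

def pvCondB (line : List Char) (old : List Char) (i : Int) : Bool :=
  decide (PySem.List.slice line (some i) (some (i + (old.length : Int))) = old) &&
  (decide (i = 0) || !(PySem.Chars.isalnum (PySem.List.pyGetD line (i - 1) ' '))) &&
  (decide ((line.length : Int) ≤ i + (old.length : Int)) ||
    !(PySem.Chars.isalnum (PySem.List.pyGetD line (i + (old.length : Int)) ' ')))

lemma pvCondB_iff (line old : List Char) (i : Int) :
    pvCondB line old i = true ↔ pvCond line old i := by
  unfold pvCondB pvCond
  simp [and_assoc]

def pvStep (line : List Char) (old : List Char) (nw : List Char)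
    (st : List Char × Int) (i : Int) : List Char × Int :=
  (st.1 ++ PySem.List.slice line (some st.2) (some i) ++ nw, i + (old.length : Int))

-- A's output restricted to indices ≥ s, starting from prev_index = prev.
def pvOut (line : List Char) (old : List Char) (nw : List Char) (s : Nat) (prev : Int) : List Char :=
  let st := ((PySem.List.pyRange (s : Int) (line.length : Int) 1).filter
      (pvCondB line old)).foldl (pvStep line old nw) ([], prev)
  st.1 ++ PySem.List.slice line (some st.2) none

lemma pvA_eq_out (line old nw : List Char) :
    replace_name_chars line old nw = pvOut line old nw 0 0 := by
  unfold replace_name_chars pvOut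
  have h : (fun (st : List Char × Int) i =>
      if PySem.List.slice line (some i) (some (i + (old.length : Int))) = old ∧
         (i = 0 ∨ ¬(PySem.Chars.isalnum (PySem.List.pyGetD line (i - 1) ' ') = true)) ∧
         ((line.length : Int) ≤ i + (old.length : Int) ∨
           ¬(PySem.Chars.isalnum (PySem.List.pyGetD line (i + (old.length : Int)) ' ') = true))
      then (st.1 ++ PySem.List.slice line (some st.2) (some i) ++ nw, i + (old.length : Int))
      else st)
      = (fun (st : List Char × Int) i =>
          if pvCondB line old i then pvStep line old nw st i else st) := by
    funext st i
    by_cases hc : pvCondB line old i = true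
    · have hc' := (pvCondB_iff line old i).mp hc
      unfold pvCond at hc'
      rw [if_pos hc', if_pos hc]
      rfl
    · have hc' : ¬ pvCond line old i := fun h => hc ((pvCondB_iff line old i).mpr h)
      unfold pvCond at hc'
      rw [if_neg hc', if_neg hc]
  rw [h, PySem.List.foldl_if_eq_foldl_filter]
  norm_num

lemma pvJoin_flatten (l : List (List Char)) : PySem.Chars.join [] l = l.flatten := by
  induction l with
  | nil => rfl
  | cons x xs ih =>
    cases xs with
    | nil => simp [PySem.Chars.join, List.intercalate]
    | cons y ys => rw [PySem.Chars.join_cons_cons]; simp_all [PySem.Chars.join]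

-- pulling the accumulator out of A's fold
lemma pvAcc_pull (line old nw : List Char) (l : List Int) :
    ∀ (acc : List Char) (prev : Int),
      l.foldl (pvStep line old nw) (acc, prev) =
        (acc ++ (l.foldl (pvStep line old nw) ([], prev)).1,
         (l.foldl (pvStep line old nw) ([], prev)).2) := by
  induction l with
  | nil => intro acc prev; simp
  | cons i t ih =>
    intro acc prev
    simp only [List.foldl_cons]
    rw [ih, ih (pvStep line old nw ([], prev) i).1]
    simp [pvStep]

lemma pvSlice_at (line old : List Char) (p : Nat) (hocc : old <+: line.drop p) :
    PySem.List.slice line (some (p : Int)) (some ((p : Int) + (old.length : Int))) = old := by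
  rw [PySem.List.slice_natCast_add]
  rw [List.prefix_iff_eq_take] at hocc
  exact hocc.symm

lemma pvCond_occ (line old : List Char) (i : Int) (h0 : 0 ≤ i)
    (hc : pvCond line old i) : old <+: line.drop i.toNat := by
  obtain ⟨h1, -, -⟩ := hc
  rw [PySem.List.slice_toNat line h0 (by omega)] at h1
  have hm : (i + (old.length : Int)).toNat - i.toNat = old.length := by omega
  rw [hm] at h1
  rw [List.prefix_iff_eq_take]
  exact h1.symm

lemma pvCond_iff_at (line old : List Char) (p : Nat) (hocc : old <+: line.drop p) :
    pvCond line old (p : Int) ↔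
      (((p == 0) || !(PySem.Chars.isalnum (line.getD (p - 1) ' '))) &&
       ((decide (line.length ≤ p + old.length)) ||
        !(PySem.Chars.isalnum (line.getD (p + old.length) ' ')))) = true := by
  have hX : ((p : Int) = 0) ↔ (p = 0) := by omega
  have hZ : ((line.length : Int) ≤ (p : Int) + (old.length : Int)) ↔ line.length ≤ p + old.length := by
    omega
  have h1 : PySem.List.pyGetD line ((p : Int) + (old.length : Int)) ' ' = line.getD (p + old.length) ' ' := by
    rw [show ((p : Int) + (old.length : Int)) = ((p + old.length : Nat) : Int) by push_cast; ring,
      PySem.List.pyGetD_natCast]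
  unfold pvCond
  rw [pvSlice_at line old p hocc, h1]
  simp only [hX, hZ, true_and, Bool.and_eq_true, Bool.or_eq_true, beq_iff_eq,
    Bool.not_eq_true', decide_eq_true_eq, Bool.not_eq_true]
  by_cases hp : p = 0
  · simp [hp]
  · have h2 : PySem.List.pyGetD line ((p : Int) - 1) ' ' = line.getD (p - 1) ' ' := by
      rw [show ((p : Int) - 1) = ((p - 1 : Nat) : Int) by omega, PySem.List.pyGetD_natCast]
    simp [h2, hp]

-- no match index in [s, n) when old does not occur in line[s:]
lemma pvCond_none (line old : List Char) (s : Nat) (hno : ¬ old <:+: line.drop s) :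
    ∀ i ∈ PySem.List.pyRange (s : Int) (line.length : Int) 1, ¬ pvCond line old i := by
  intro i hi hc
  rw [PySem.List.mem_pyRange_one] at hi
  have hocc := pvCond_occ line old i (by omega) hc
  apply hno
  have hdrop : line.drop i.toNat = (line.drop s).drop (i.toNat - s) := by
    rw [List.drop_drop]
    congr 1
    omega
  rw [hdrop] at hocc
  exact hocc.isInfix.trans (List.drop_suffix _ _).isInfix

-- one step of A's filtered fold, at the first occurrence p ≥ s
lemma pvOut_step (line old nw : List Char) (s p : Nat) (hs : s ≤ p)
    (hpm : p + old.length ≤ line.length) (hm : old ≠ [])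
    (hmin : ∀ i : Nat, s ≤ i → i < p → ¬ old <+: line.drop i)
    (prev : Int) :
    pvOut line old nw s prev =
      if pvCondB line old (p : Int)
      then PySem.List.slice line (some prev) (some (p : Int)) ++ nw ++
             pvOut line old nw (p + 1) ((p + old.length : Nat) : Int)
      else pvOut line old nw (p + 1) prev := by
  have hm1 : 0 < old.length := List.length_pos_iff.mpr hm
  have hsplit : PySem.List.pyRange (s : Int) (line.length : Int) 1 =
      PySem.List.pyRange (s : Int) (p : Int) 1 ++
        (p : Int) :: PySem.List.pyRange ((p : Int) + 1) (line.length : Int) 1 := by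
    have h2 : PySem.List.pyRange (p : Int) (line.length : Int) 1 =
        (p : Int) :: PySem.List.pyRange ((p : Int) + 1) (line.length : Int) 1 :=
      PySem.List.pyRange_one_cons (by omega)
    rw [PySem.List.pyRange_one_append (s : Int) (p : Int) (line.length : Int) (by omega) (by omega), h2]
  have hfilt1 : (PySem.List.pyRange (s : Int) (p : Int) 1).filter
      (pvCondB line old) = [] := by
    rw [List.filter_eq_nil_iff]
    intro i hi
    rw [PySem.List.mem_pyRange_one] at hi
    intro hc
    exact hmin i.toNat (by omega) (by omega)
      (pvCond_occ line old i (by omega) ((pvCondB_iff line old i).mp hc))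
  have hcast : ((p : Int) + 1) = ((p + 1 : Nat) : Int) := by push_cast; ring
  unfold pvOut
  rw [hsplit, List.filter_append, hfilt1, List.nil_append, List.filter_cons]
  by_cases hc : pvCondB line old (p : Int) = true
  · rw [if_pos hc, if_pos hc]
    simp only [List.foldl_cons]
    rw [pvAcc_pull]
    have hstep : pvStep line old nw ([], prev) (p : Int) =
        (PySem.List.slice line (some prev) (some (p : Int)) ++ nw, ((p + old.length : Nat) : Int)) := by
      unfold pvStep
      simp only [List.nil_append, Nat.cast_add]
    rw [hstep, hcast]
    simp [List.append_assoc]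
  · rw [if_neg hc, if_neg hc, hcast]

lemma pv_go_join (line old nw : List Char) (hold : old ≠ []) :
    ∀ (k s : Nat), line.length - s = k → s ≤ line.length →
      ∀ (parts : List (List Char)) (prev : Nat),
        PySem.Chars.join [] (replace_name_alt_go line old nw parts prev s) =
          PySem.Chars.join [] parts ++ pvOut line old nw s ((prev : Nat) : Int) := by
  intro k
  induction k using Nat.strong_induction_on with
  | _ k ih =>
    intro s hk hs parts prev
    rw [replace_name_alt_go]
    by_cases hstop : PySem.Chars.findFrom line old (s : Int) none = -1
    · rw [dif_pos (Or.inl hstop)]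
      have hno := (PySem.Chars.findFrom_natCast_eq_neg_one_iff line old s hs).mp hstop
      have hfilt : (PySem.List.pyRange (s : Int) (line.length : Int) 1).filter
          (pvCondB line old) = [] := by
        rw [List.filter_eq_nil_iff]
        intro i hi hc
        exact pvCond_none line old s hno i hi ((pvCondB_iff line old i).mp hc)
      unfold pvOut
      rw [hfilt]
      simp [pvJoin_flatten]
    · have hcond : ¬ (PySem.Chars.findFrom line old (s : Int) none = -1 ∨
          line.length < s) := by
        rintro (h | h)
        · exact hstop h
        · omega
      rw [dif_neg hcond]
      obtain ⟨hge, hocc, hmin⟩ := PySem.Chars.findFrom_natCast_spec line old s hs hstop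
      have h0le : 0 ≤ PySem.Chars.findFrom line old (s : Int) none := le_trans (by omega) hge
      set p := (PySem.Chars.findFrom line old (s : Int) none).toNat with hp
      have hsp : s ≤ p := by omega
      have hm1 : 0 < old.length := List.length_pos_iff.mpr hold
      have hpm : p + old.length ≤ line.length := by
        have := hocc.length_le
        rw [List.length_drop] at this
        omega
      have hmin' : ∀ i : Nat, s ≤ i → i < p → ¬ old <+: line.drop i := fun i h1 h2 => hmin i h1 h2
      rw [pvOut_step line old nw s p hsp hpm hold hmin' ((prev : Nat) : Int)]
      by_cases hb : pvCondB line old (p : Int) = true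
      · rw [if_pos ((pvCond_iff_at line old p hocc).mp ((pvCondB_iff line old _).mp hb)), if_pos hb]
        rw [ih (line.length - (p + 1)) (by omega) (p + 1) rfl (by omega)]
        simp [pvJoin_flatten, List.append_assoc]
      · rw [if_neg (by
            intro hbt
            exact hb ((pvCondB_iff line old _).mpr ((pvCond_iff_at line old p hocc).mpr hbt))), if_neg hb]
        exact ih (line.length - (p + 1)) (by omega) (p + 1) rfl (by omega) parts prev

-- ===== VERDICT (by name: the statement is the Claim_ definition above) =====
theorem replace_name_spec : Claim_equal_replace_name := by
  intro line old new _hDom hPre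
  unfold Spec_replace_name replace_name replace_name_alt
  have hold : old.toList ≠ [] := fun h => hPre (String.toList_eq_nil_iff.mp h)
  rw [if_neg hold, pvA_eq_out]
  rw [pv_go_join line.toList old.toList new.toList hold
    (line.toList.length - 0) 0 rfl (Nat.zero_le _) [] 0]
  simp
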